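-- pv_equiv track=rewrite | github.com/iisdd/internship | find_contour_test.py | sort_li
-- ===== SOURCE A (Python) =====
-- def sort_li(li):
--     # 输入一个列表[[x1, y1], [x2, y2], ..., ], 输出有序列表, x,y都从大到小排
--     res = []
--     li = sorted(li, key=lambda x: -x[1])                        # 倒序,从大到小
--     n = len(li)
--     i = 0
--     head = li[0][1]                                             # 这一行内最大的y
--     tmp_li = []
--     while i < n:
--         tmp_li.append(li[i])
--         if i < n - 1 and head - li[i + 1][1] < 30:              # 距离小于30就算是同一行
--             i += 1
--             continue
--         else:                                                   # 一行的最后一个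
--             res += sorted(tmp_li, key=lambda x: -x[0])          # 从大到小排
--             tmp_li = []
--             if i < n - 1:
--                 head = li[i + 1][1]
--         i += 1
--     return res
-- ===== SOURCE B (Python) =====
-- def sort_li(li):
--     # label each point with its row index, then ONE global stable sort by (row, -x)
--     li = sorted(li, key=lambda p: -p[1])
--     heads = [li[0][1]]                      # y of each row's first point
--     for p in li:
--         if heads[-1] - p[1] >= 30:
--             heads.append(p[1])
--     def row(p):
--         return sum(1 for h in heads if h - p[1] >= 30)
--     return sorted(li, key=lambda p: (row(p), -p[0]))
-- ===== Notes on version B (the rewrite author's own statement) =====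
-- stated objective: alternative
-- what changed: A builds the output inside one while loop that flushes and x-sorts each row with a one-element lookahead; B never sorts rows separately: it collects the y of each row's first point (heads), labels every point with a row index computed by counting heads at distance >= 30, and performs ONE global stable sort of the whole list by the composite key (row index, -x).
import Mathlib
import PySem

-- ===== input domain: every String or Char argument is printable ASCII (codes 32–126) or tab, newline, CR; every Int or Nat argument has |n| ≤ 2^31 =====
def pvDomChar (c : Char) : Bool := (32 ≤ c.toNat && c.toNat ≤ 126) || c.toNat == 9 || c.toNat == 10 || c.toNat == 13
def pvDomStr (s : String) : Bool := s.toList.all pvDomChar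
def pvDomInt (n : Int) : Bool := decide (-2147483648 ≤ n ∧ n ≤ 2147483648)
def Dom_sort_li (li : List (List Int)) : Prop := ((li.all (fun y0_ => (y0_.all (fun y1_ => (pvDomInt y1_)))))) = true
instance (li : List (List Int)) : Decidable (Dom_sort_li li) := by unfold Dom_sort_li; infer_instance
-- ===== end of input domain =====

-- B replaces A's single while-loop (flush and x-sort each row with a one-element lookahead) by a row-LABELLING scheme:
-- collect the y of each row's first point ("heads"), give every point the row index counted from the heads list,
-- and do ONE global stable sort of the whole list by the composite key (row index, -x); no speed claim.

-- p[1] / p[0] (valid under Pre_, where every point has length ≥ 2)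
def pvY (p : List Int) : Int := (PySem.List.pyGet? p 1).getD 0
def pvX (p : List Int) : Int := (PySem.List.pyGet? p 0).getD 0

-- sorted(li, key=lambda p: -p[1]) and sorted(g, key=lambda p: -p[0])
def pvSortY (li : List (List Int)) : List (List Int) := PySem.List.sorted li (fun p => -(pvY p)) false
def pvSortX (g : List (List Int)) : List (List Int) := PySem.List.sorted g (fun p => -(pvX p)) false

-- ===== PORT A =====
-- the while loop: state (remaining suffix li[i:], head, tmp_li, res); the 'i < n - 1' lookahead is the match on the tail
def pvLoopA : List (List Int) → Int → List (List Int) → List (List Int) → List (List Int)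
  | [], _, _, res => res
  | [p], _, tmp, res => res ++ pvSortX (tmp ++ [p])
  | p :: q :: rest, head, tmp, res =>
      if head - pvY q < 30 then pvLoopA (q :: rest) head (tmp ++ [p]) res
      else pvLoopA (q :: rest) (pvY q) [] (res ++ pvSortX (tmp ++ [p]))

def sort_li (li : List (List Int)) : List (List Int) :=
  match pvSortY li with
  | [] => []  -- Python raises IndexError at li[0][1] here; excluded by Pre_
  | p :: rest => pvLoopA (p :: rest) (pvY p) [] []

-- ===== PORT B =====
-- the heads loop: 'if heads[-1] - p[1] >= 30: heads.append(p[1])'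
def pvHeadStep (hs : List Int) (q : List Int) : List Int :=
  if hs.getLastD 0 - pvY q ≥ 30 then hs ++ [pvY q] else hs

-- row(p) = sum(1 for h in heads if h - p[1] >= 30)
def pvRowKey (heads : List Int) (q : List Int) : Int :=
  heads.foldl (fun acc h => if h - pvY q ≥ 30 then acc + 1 else acc) 0

def sort_li_alt (li : List (List Int)) : List (List Int) :=
  match pvSortY li with
  | [] => []  -- Python B raises IndexError at li[0][1] here; excluded by Pre_
  | p :: rest =>
      let heads := (p :: rest).foldl pvHeadStep [pvY p]
      PySem.List.sorted2 (p :: rest) (fun q => pvRowKey heads q) (fun q => -(pvX q)) false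

-- ===== PRECONDITION & SPEC =====
-- Pre_ excludes exactly the inputs where both Pythons raise IndexError: the empty list (li[0][1]) and points shorter than 2 (p[1]/p[0] in the sort keys).
def Pre_sort_li (li : List (List Int)) : Prop := li ≠ [] ∧ ∀ p ∈ li, 2 ≤ p.length
instance (li : List (List Int)) : Decidable (Pre_sort_li li) := by unfold Pre_sort_li; infer_instance
def pvWitness_sort_li : List (List Int) := [[40, 100], [10, 95], [7, 2]]

def Spec_sort_li (li : List (List Int)) (out : List (List Int)) : Prop := out = sort_li_alt li
instance (li : List (List Int)) (out : List (List Int)) : Decidable (Spec_sort_li li out) := by unfold Spec_sort_li; infer_instance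

-- ===== CLAIM (what is proved, stated in full; the proofs are below) =====
def Claim_equal_sort_li : Prop := ∀ (li : List (List Int)), Dom_sort_li li → Pre_sort_li li → Spec_sort_li li (sort_li li)

-- ===== LEMMAS AND PROOFS =====

-- proof-side view of A's grouping: split the y-sorted list into rows
def pvRows (head : Int) (cur : List (List Int)) : List (List Int) → List (List (List Int))
  | [] => [cur]
  | q :: rest =>
      if head - pvY q ≥ 30 then cur :: pvRows (pvY q) [q] rest
      else pvRows head (cur ++ [q]) rest

-- proof-side view of B's heads loop: the heads CONTRIBUTED by the remaining points
def pvHeadsSpec (head : Int) : List (List Int) → List Int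
  | [] => []
  | q :: rest =>
      if head - pvY q ≥ 30 then pvY q :: pvHeadsSpec (pvY q) rest
      else pvHeadsSpec head rest

-- A's loop produces the per-row x-sorted concatenation of pvRows
theorem pvLoopA_rows (ps : List (List Int)) :
    ∀ (p : List Int) (head : Int) (tmp res : List (List Int)),
    pvLoopA (p :: ps) head tmp res = res ++ (pvRows head (tmp ++ [p]) ps).flatMap pvSortX := by
  induction ps with
  | nil => intro p head tmp res; simp [pvLoopA, pvRows]
  | cons q rest ih =>
      intro p head tmp res
      by_cases hc : head - pvY q < 30
      · have hn : ¬ head - pvY q ≥ 30 := by omega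
        simp only [pvLoopA, if_pos hc, pvRows, if_neg hn]
        rw [ih q head (tmp ++ [p]) res]
      · have hn : head - pvY q ≥ 30 := by omega
        simp only [pvLoopA, if_neg hc, pvRows, if_pos hn]
        rw [ih q (pvY q) [] (res ++ pvSortX (tmp ++ [p]))]
        simp

-- B's heads fold appends pvHeadsSpec
theorem pvHeads_fold (ps : List (List Int)) :
    ∀ (hs : List Int) (head : Int), hs.getLastD 0 = head →
    ps.foldl pvHeadStep hs = hs ++ pvHeadsSpec head ps := by
  induction ps with
  | nil => intro hs head _; simp [pvHeadsSpec]
  | cons q rest ih =>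
      intro hs head hlast
      by_cases hc : head - pvY q ≥ 30
      · simp only [List.foldl_cons, pvHeadStep, hlast, if_pos hc, pvHeadsSpec]
        rw [ih (hs ++ [pvY q]) (pvY q) (by simp)]
        simp
      · simp only [List.foldl_cons, pvHeadStep, hlast, if_neg hc, pvHeadsSpec]
        exact ih hs head hlast

-- every contributed head is the y of some remaining point
theorem pvHeadsSpec_mem (ps : List (List Int)) :
    ∀ (head : Int) (h : Int), h ∈ pvHeadsSpec head ps → ∃ r ∈ ps, h = pvY r := by
  induction ps with
  | nil => intro head h hm; simp [pvHeadsSpec] at hm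
  | cons q rest ih =>
      intro head h hm
      by_cases hc : head - pvY q ≥ 30
      · simp only [pvHeadsSpec, if_pos hc, List.mem_cons] at hm
        rcases hm with h1 | h2
        · exact ⟨q, by simp, h1⟩
        · obtain ⟨r, hr, he⟩ := ih (pvY q) h h2
          exact ⟨r, by simp [hr], he⟩
      · simp only [pvHeadsSpec, if_neg hc] at hm
        obtain ⟨r, hr, he⟩ := ih head h hm
        exact ⟨r, by simp [hr], he⟩

-- the row key is a 0/1 count over heads
theorem pvRowKey_countP (heads : List Int) (q : List Int) :
    pvRowKey heads q = (heads.countP (fun h => decide (h - pvY q ≥ 30)) : Int) := by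
  unfold pvRowKey
  rw [PySem.List.foldl_ite_add_one (p := fun h => h - pvY q ≥ 30)]
  simp

-- insertBy passes over a prefix it does not go before
theorem insertBy_append_of_not {α : Type} (before : α → α → Bool) (x : α) (ys zs : List α)
    (h : ∀ y ∈ ys, before x y = false) :
    PySem.List.insertBy before x (ys ++ zs) = ys ++ PySem.List.insertBy before x zs := by
  induction ys with
  | nil => simp
  | cons y t ih =>
      simp only [List.cons_append, PySem.List.insertBy, h y (by simp)]
      simp only [Bool.false_eq_true, if_false, List.cons.injEq, true_and]
      exact ih (fun z hz => h z (by simp [hz]))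

-- an insertion-sort fold never disturbs a prefix every inserted element refuses to go before
theorem foldl_insertBy_append {α : Type} (before : α → α → Bool) (l : List α) :
    ∀ (S T : List α), (∀ e ∈ l, ∀ s ∈ S, before e s = false) →
    l.foldl (fun acc x => PySem.List.insertBy before x acc) (S ++ T)
      = S ++ l.foldl (fun acc x => PySem.List.insertBy before x acc) T := by
  induction l with
  | nil => intro S T _; simp
  | cons e t ih =>
      intro S T h
      simp only [List.foldl_cons]
      rw [insertBy_append_of_not before e S T (fun s hs => h e (by simp) s hs)]
      exact ih S _ (fun e' he' s hs => h e' (by simp [he']) s hs)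

-- insertBy only depends on 'before' at the inserted element and list members
theorem insertBy_congr {α : Type} (b1 b2 : α → α → Bool) (x : α) (ys : List α)
    (h : ∀ y ∈ ys, b1 x y = b2 x y) :
    PySem.List.insertBy b1 x ys = PySem.List.insertBy b2 x ys := by
  induction ys with
  | nil => rfl
  | cons y t ih =>
      simp only [PySem.List.insertBy, h y (by simp)]
      rw [ih (fun z hz => h z (by simp [hz]))]

theorem foldl_insertBy_congr {α : Type} (b1 b2 : α → α → Bool) (P : α → Prop)
    (hb : ∀ x y, P x → P y → b1 x y = b2 x y) (l : List α) :
    ∀ (acc : List α), (∀ a ∈ acc, P a) → (∀ a ∈ l, P a) →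
    l.foldl (fun acc x => PySem.List.insertBy b1 x acc) acc
      = l.foldl (fun acc x => PySem.List.insertBy b2 x acc) acc := by
  induction l with
  | nil => intro acc _ _; rfl
  | cons e t ih =>
      intro acc hacc hl
      simp only [List.foldl_cons]
      rw [insertBy_congr b1 b2 e acc (fun y hy => hb e y (hl e (by simp)) (hacc y hy))]
      refine ih _ ?_ (fun a ha => hl a (by simp [ha]))
      intro a ha
      rw [PySem.List.mem_insertBy] at ha
      rcases ha with rfl | ha
      · exact hl a (by simp)
      · exact hacc a ha

-- a block whose primary key is strictly below the rest sorts in front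
theorem sorted2_append_blocks {α : Type} (k1 k2 : α → Int) (xs ys : List α)
    (h : ∀ a ∈ xs, ∀ b ∈ ys, k1 a < k1 b) :
    PySem.List.sorted2 (xs ++ ys) k1 k2 false
      = PySem.List.sorted2 xs k1 k2 false ++ PySem.List.sorted2 ys k1 k2 false := by
  simp only [PySem.List.sorted2, if_neg (by decide : ¬ (false = true)), List.foldl_append]
  have H := foldl_insertBy_append
    (fun a b => decide (k1 a < k1 b) || !decide (k1 b < k1 a) && decide (k2 a < k2 b)) ys
    (List.foldl (fun acc x => PySem.List.insertBy
      (fun a b => decide (k1 a < k1 b) || !decide (k1 b < k1 a) && decide (k2 a < k2 b)) x acc) [] xs) [] ?_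
  · rw [List.append_nil] at H
    exact H
  · intro e he s hs
    have hsx : s ∈ xs := ((PySem.List.sorted2_perm xs k1 k2 false).mem_iff).mp hs
    have := h s hsx e he
    simp only [Bool.or_eq_false_iff, Bool.and_eq_false_iff]
    constructor
    · simp; omega
    · left; simp; omega

-- a block with constant primary key sorts by the secondary key alone
theorem sorted2_const_k1 {α : Type} (k1 k2 : α → Int) (xs : List α) (c : Int)
    (h : ∀ a ∈ xs, k1 a = c) :
    PySem.List.sorted2 xs k1 k2 false = PySem.List.sorted xs k2 false := by
  simp only [PySem.List.sorted2, PySem.List.sorted, if_neg (by decide : ¬ (false = true))]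
  refine foldl_insertBy_congr _ _ (fun a => k1 a = c) ?_ xs [] (by simp) h
  intro x y hx hy
  simp [hx, hy]

-- blocks labelled by their index sort into the concatenation of per-block sorts
theorem sorted2_rows {α : Type} (k1 k2 : α → Int) (gs : List (List α)) :
    ∀ (m : Int), (∀ j (hj : j < gs.length), ∀ a ∈ gs[j], k1 a = m + j) →
    PySem.List.sorted2 gs.flatten k1 k2 false
      = gs.flatMap (fun g => PySem.List.sorted g k2 false) := by
  induction gs with
  | nil => intro m _; simp [PySem.List.sorted2]
  | cons g t ih =>
      intro m h
      rw [List.flatten_cons, sorted2_append_blocks k1 k2 g t.flatten, List.flatMap_cons]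
      · rw [sorted2_const_k1 k1 k2 g m (fun a ha => by simpa using h 0 (by simp) a (by simpa using ha))]
        rw [ih (m + 1) ?_]
        intro j hj a ha
        have := h (j + 1) (by simpa using hj) a (by simpa using ha)
        push_cast at this ⊢
        omega
      · intro a ha b hb
        have ha0 : k1 a = m := by simpa using h 0 (by simp) a (by simpa using ha)
        obtain ⟨l, hl, hbl⟩ := List.mem_flatten.mp hb
        obtain ⟨j, hj, rfl⟩ := List.mem_iff_getElem.mp hl
        have := h (j + 1) (by simpa using hj) b (by simpa using hbl)
        push_cast at this
        omega

-- the master invariant: pvRows flattens back to the input, and every point's row key is its row index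
theorem pvRows_spec (ps : List (List Int)) :
    ∀ (head : Int) (cur : List (List Int)),
    (∀ a ∈ cur, head - pvY a < 30) →
    (∀ q ∈ ps, pvY q ≤ head) →
    ps.Pairwise (fun a b => pvY b ≤ pvY a) →
    (pvRows head cur ps).flatten = cur ++ ps ∧
    (∀ j (hj : j < (pvRows head cur ps).length), ∀ a ∈ (pvRows head cur ps)[j],
      pvRowKey (head :: pvHeadsSpec head ps) a = (j : Int)) := by
  induction ps with
  | nil =>
      intro head cur hcur _ _
      refine ⟨by simp [pvRows], ?_⟩
      intro j hj a ha
      simp only [pvRows, List.length_cons, List.length_nil] at hj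
      interval_cases j
      simp only [pvRows] at ha
      rw [pvRowKey_countP]
      have := hcur a (by simpa using ha)
      simp [pvHeadsSpec, List.countP_cons, List.countP_nil]
      omega
  | cons q rest ih =>
      intro head cur hcur hle hpw
      have hq : pvY q ≤ head := hle q (by simp)
      have hrest : ∀ r ∈ rest, pvY r ≤ pvY q := by
        intro r hr; exact (List.pairwise_cons.mp hpw).1 r hr
      have hpw' := (List.pairwise_cons.mp hpw).2
      by_cases hc : head - pvY q ≥ 30
      · -- new row starts at q
        obtain ⟨hflat, hkey⟩ := ih (pvY q) [q]
          (by intro a ha; simp at ha; subst ha; omega)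
          hrest hpw'
        constructor
        · simp only [pvRows, if_pos hc, List.flatten_cons, hflat]
          simp
        · intro j hj a ha
          simp only [pvRows, if_pos hc] at hj ha ⊢
          simp only [pvHeadsSpec, if_pos hc]
          match j with
          | 0 =>
              simp only [List.getElem_cons_zero] at ha
              rw [pvRowKey_countP]
              have h1 : head - pvY a < 30 := hcur a ha
              have h2 : ∀ h ∈ pvHeadsSpec (pvY q) rest, h ≤ pvY q := by
                intro h hm
                obtain ⟨r, hr, rfl⟩ := pvHeadsSpec_mem rest (pvY q) h hm
                exact hrest r hr
              simp only [List.countP_cons]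
              have e1 : (decide (head - pvY a ≥ 30)) = false := by simp; omega
              have e2 : (decide (pvY q - pvY a ≥ 30)) = false := by simp; omega
              rw [e1, e2]
              have e3 : (pvHeadsSpec (pvY q) rest).countP (fun h => decide (h - pvY a ≥ 30)) = 0 := by
                rw [List.countP_eq_zero]
                intro h hm
                have := h2 h hm
                simp; omega
              simp [e3]
          | j' + 1 =>
              simp only [List.getElem_cons_succ] at ha
              have hjl : j' < (pvRows (pvY q) [q] rest).length := by
                simpa using hj
              have hkey' := hkey j' hjl a ha
              rw [pvRowKey_countP] at hkey' ⊢
              have hmem : a ∈ (pvRows (pvY q) [q] rest).flatten :=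
                List.mem_flatten.mpr ⟨_, List.getElem_mem hjl, ha⟩
              rw [hflat] at hmem
              have hya : pvY a ≤ pvY q := by
                simp only [List.cons_append, List.nil_append, List.mem_cons] at hmem
                rcases hmem with rfl | hm
                · exact le_refl _
                · exact hrest a hm
              have e2 : (head :: pvY q :: pvHeadsSpec (pvY q) rest).countP
                  (fun h => decide (h - pvY a ≥ 30))
                  = (pvY q :: pvHeadsSpec (pvY q) rest).countP
                      (fun h => decide (h - pvY a ≥ 30)) + 1 := by
                rw [List.countP_cons]
                simp only [ge_iff_le, decide_eq_true_eq]
                rw [if_pos (by omega)]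
              rw [e2]
              push_cast at hkey' ⊢
              omega
      · -- q joins the current row
        obtain ⟨hflat, hkey⟩ := ih head (cur ++ [q])
          (by intro a ha
              rcases List.mem_append.mp ha with h1 | h2
              · exact hcur a h1
              · simp at h2; subst h2; omega)
          (fun r hr => le_trans (hrest r hr) hq) hpw'
        constructor
        · simp only [pvRows, if_neg hc, hflat]
          simp
        · intro j hj a ha
          simp only [pvRows, if_neg hc] at hj ha ⊢
          simp only [pvHeadsSpec, if_neg hc]
          exact hkey j hj a ha

-- y-descending order of the sorted list
theorem pvSortY_pairwise (li : List (List Int)) :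
    (pvSortY li).Pairwise (fun a b => pvY b ≤ pvY a) := by
  have := PySem.List.sorted_pairwise li (fun p => -(pvY p))
  unfold pvSortY
  exact this.imp (by intro a b h; omega)

-- ===== VERDICT (by name: the statement is the Claim_ definition above) =====
theorem sort_li_spec : Claim_equal_sort_li := by
  intro li _hdom _hpre
  unfold Spec_sort_li sort_li sort_li_alt
  cases h : pvSortY li with
  | nil => rfl
  | cons p rest =>
      dsimp only
      have hpw : (p :: rest).Pairwise (fun a b => pvY b ≤ pvY a) := by
        rw [← h]; exact pvSortY_pairwise li
      have hle : ∀ q ∈ rest, pvY q ≤ pvY p := (List.pairwise_cons.mp hpw).1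
      have hpw' := (List.pairwise_cons.mp hpw).2
      obtain ⟨hflat, hkey⟩ := pvRows_spec rest (pvY p) [p]
        (by intro a ha; simp at ha; subst ha; omega) hle hpw'
      -- B's heads = pvY p :: pvHeadsSpec (pvY p) rest
      have hheads : (p :: rest).foldl pvHeadStep [pvY p]
          = pvY p :: pvHeadsSpec (pvY p) rest := by
        simp only [List.foldl_cons, pvHeadStep]
        rw [if_neg (by simp)]
        exact pvHeads_fold rest [pvY p] (pvY p) (by simp)
      rw [pvLoopA_rows rest p (pvY p) [] [], List.nil_append, List.nil_append, hheads]
      have hflat' : p :: rest = (pvRows (pvY p) [p] rest).flatten := by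
        rw [hflat]; simp
      rw [hflat']
      rw [sorted2_rows (fun q => pvRowKey (pvY p :: pvHeadsSpec (pvY p) rest) q)
            (fun q => -(pvX q)) (pvRows (pvY p) [p] rest) 0 ?_]
      · rfl
      · intro j hj a ha
        simpa using hkey j hj a ha
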